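-- pv_equiv track=rewrite | github.com/LadnerLab/ProteinOligoLibrary | protein_oligo_library.py | get_unique_sequences
-- ===== SOURCE A (Python) =====
-- def get_unique_sequences( names_list, sequence_list ):
--     sequence_dict = {}
--     out_names, out_seqs = list(), list()
--
--     for item in range( len( sequence_list ) ):
--         sequence_dict[ sequence_list[ item ] ] = names_list[ item ]
--
--     for sequence, name in sequence_dict.items():
--         out_names.append( name )
--         out_seqs.append( sequence )
--     return out_names, out_seqs
-- ===== SOURCE B (Python) =====
-- def get_unique_sequences(names_list, sequence_list):
--     # One pass: keep an index map from sequence -> its slot in the output,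
--     # append on first sight, overwrite the stored name in place on repeats.
--     pos = {}
--     out_names, out_seqs = [], []
--     for i in range(len(sequence_list)):
--         seq = sequence_list[i]
--         name = names_list[i]
--         j = pos.get(seq)
--         if j is None:
--             pos[seq] = len(out_seqs)
--             out_names.append(name)
--             out_seqs.append(seq)
--         else:
--             out_names[j] = name
--     return out_names, out_seqs
-- ===== Notes on version B (the rewrite author's own statement) =====
-- stated objective: alternative
-- what changed: Replaces A's two-phase build-a-dict-then-iterate-items with a single pass that maintains an index map into the growing output lists, appending on first sight and overwriting the stored name in place on repeats.
import Mathlib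
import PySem

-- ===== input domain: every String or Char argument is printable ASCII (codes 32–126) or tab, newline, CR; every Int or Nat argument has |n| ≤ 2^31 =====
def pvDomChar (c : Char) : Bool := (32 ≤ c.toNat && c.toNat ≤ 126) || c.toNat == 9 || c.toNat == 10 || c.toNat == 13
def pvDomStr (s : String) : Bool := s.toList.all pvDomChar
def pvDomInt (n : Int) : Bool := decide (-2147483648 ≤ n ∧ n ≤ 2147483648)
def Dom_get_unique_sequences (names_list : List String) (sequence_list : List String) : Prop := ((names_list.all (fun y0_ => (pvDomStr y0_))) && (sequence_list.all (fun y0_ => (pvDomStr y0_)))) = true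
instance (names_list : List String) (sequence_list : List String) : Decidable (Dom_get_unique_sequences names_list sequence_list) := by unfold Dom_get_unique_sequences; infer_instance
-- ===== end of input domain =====

-- B replaces A's build-dict-then-iterate-items with one pass maintaining an index map
-- into the growing output lists (alternative decomposition, same O(n) cost).

-- ===== PORT A =====
def get_unique_sequences (names_list : List String) (sequence_list : List String) : List String × List String :=
  -- sequence_dict[sequence_list[item]] = names_list[item]  for item in range(len(sequence_list))
  let sequence_dict : PySem.Dict String String :=
    (PySem.List.pyRange 0 sequence_list.length 1).foldl
      (fun d item => d.insert (PySem.List.pyGetD sequence_list item "") (PySem.List.pyGetD names_list item ""))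
      PySem.Dict.empty
  -- for sequence, name in sequence_dict.items(): append name / sequence
  let p := sequence_dict.items.foldl
      (fun (p : List String × List String) kv => (p.1 ++ [kv.2], p.2 ++ [kv.1])) ([], [])
  (p.1, p.2)

-- ===== PORT B =====
def get_unique_sequences_alt (names_list : List String) (sequence_list : List String) : List String × List String :=
  let st :=
    (PySem.List.pyRange 0 sequence_list.length 1).foldl
      (fun (st : PySem.Dict String Int × List String × List String) i =>
        let seq := PySem.List.pyGetD sequence_list i ""
        let name := PySem.List.pyGetD names_list i ""
        match st.1.get? seq with
        | none => (st.1.insert seq (st.2.2.length : Int), st.2.1 ++ [name], st.2.2 ++ [seq])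
        | some j => (st.1, PySem.List.pySetD st.2.1 j name, st.2.2))  -- out_names[j] = name; j is always in range
      (PySem.Dict.empty, [], [])
  (st.2.1, st.2.2)

-- ===== PRECONDITION & SPEC =====
-- Pre_ excludes exactly the inputs where A raises IndexError (names_list shorter than sequence_list).
def Pre_get_unique_sequences (names_list : List String) (sequence_list : List String) : Prop :=
  sequence_list.length ≤ names_list.length
instance (names_list : List String) (sequence_list : List String) : Decidable (Pre_get_unique_sequences names_list sequence_list) := by unfold Pre_get_unique_sequences; infer_instance
def pvWitness_get_unique_sequences : List String × List String := (["n1", "n2"], ["s", "s"])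

def Spec_get_unique_sequences (names_list : List String) (sequence_list : List String) (out : List String × List String) : Prop := out = get_unique_sequences_alt names_list sequence_list
instance (names_list : List String) (sequence_list : List String) (out : List String × List String) : Decidable (Spec_get_unique_sequences names_list sequence_list out) := by unfold Spec_get_unique_sequences; infer_instance

-- ===== CLAIM (what is proved, stated in full; the proofs are below) =====
def Claim_equal_get_unique_sequences : Prop := ∀ (names_list : List String) (sequence_list : List String), Dom_get_unique_sequences names_list sequence_list → Pre_get_unique_sequences names_list sequence_list → Spec_get_unique_sequences names_list sequence_list (get_unique_sequences names_list sequence_list)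

-- ===== LEMMAS AND PROOFS =====

-- Both index loops read (sequence_list[i], names_list[i]); convert them to a fold over the zip.
theorem foldl_pyRange_two_aux {α : Type} (g : α → String → String → α) :
    ∀ (m a : Nat) (seqs names : List String) (init : α),
      seqs.length ≤ names.length → a + m = seqs.length →
      (PySem.List.pyRange (a : Int) (seqs.length : Int) 1).foldl
          (fun acc i => g acc (PySem.List.pyGetD seqs i "") (PySem.List.pyGetD names i "")) init
        = ((seqs.drop a).zip (names.drop a)).foldl (fun acc p => g acc p.1 p.2) init := by
  intro m
  induction m with
  | zero =>
      intro a seqs names init _ ha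
      rw [PySem.List.pyRange_one_eq_nil (by omega)]
      rw [List.drop_eq_nil_of_le (by omega)]
      simp
  | succ m ih =>
      intro a seqs names init hlen ha
      have halt : a < seqs.length := by omega
      have haln : a < names.length := by omega
      rw [PySem.List.pyRange_one_cons (by exact_mod_cast halt)]
      rw [List.foldl_cons]
      have h1 : PySem.List.pyGetD seqs (a : Int) "" = seqs[a] := by
        rw [PySem.List.pyGetD_natCast]; exact List.getD_eq_getElem _ _ halt
      have h2 : PySem.List.pyGetD names (a : Int) "" = names[a] := by
        rw [PySem.List.pyGetD_natCast]; exact List.getD_eq_getElem _ _ haln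
      have hcast : (a : Int) + 1 = ((a + 1 : Nat) : Int) := by push_cast; ring
      rw [h1, h2, hcast, ih (a + 1) seqs names _ hlen (by omega)]
      rw [List.drop_eq_getElem_cons halt, List.drop_eq_getElem_cons haln, List.zip_cons_cons,
        List.foldl_cons]

-- A's output loop over items is (values, keys).
theorem items_out_loop (l : List (String × String)) :
    ∀ (acc : List String × List String),
      l.foldl (fun (p : List String × List String) kv => (p.1 ++ [kv.2], p.2 ++ [kv.1])) acc
        = (acc.1 ++ l.map (·.2), acc.2 ++ l.map (·.1)) := by
  induction l with
  | nil => intro acc; simp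
  | cons x xs ih => intro acc; simp [ih]

-- Replacing the (unique) value at key `s` in an item list rewrites the values list at idxOf s.
theorem map_snd_replace (l : List (String × String)) (s v : String) :
    (l.map (·.1)).Nodup → s ∈ l.map (·.1) →
    (l.map (fun p => if p.1 == s then (s, v) else p)).map (·.2)
      = (l.map (·.2)).set ((l.map (·.1)).idxOf s) v := by
  induction l with
  | nil => simp
  | cons x xs ih =>
      intro hnd hmem
      simp only [List.map_cons, List.nodup_cons] at hnd ⊢
      by_cases hx : x.1 = s
      · subst hx
        simp only [List.idxOf_cons_self, beq_self_eq_true, if_pos, List.set_cons_zero]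
        have : ∀ p ∈ xs, (fun p : String × String => if p.1 == x.1 then (x.1, v) else p) p = p := by
          intro p hp
          have : p.1 ≠ x.1 := fun h => hnd.1 (h ▸ List.mem_map_of_mem hp)
          simp [this]
        rw [List.map_congr_left this]
        simp
      · have hmem' : s ∈ xs.map (·.1) := by
          rcases List.mem_cons.mp hmem with h | h
          · exact absurd h.symm hx
          · exact h
        rw [List.idxOf_cons_ne _ (by exact fun h => hx (by simpa using h))]
        simp only [beq_iff_eq, List.map_map] at ih ⊢
        simp only [if_neg hx, List.set_cons_succ]
        rw [ih hnd.2 hmem']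

theorem idxOf?_append_ne (l : List String) (s k : String) (h : k ≠ s) :
    (l ++ [s]).idxOf? k = l.idxOf? k := by
  induction l with
  | nil => simp [List.idxOf?]; exact fun h' => h h'.symm
  | cons x xs ih => simp only [List.cons_append, List.idxOf?_cons, ih]

theorem idxOf?_append_self (l : List String) (s : String) (h : s ∉ l) :
    (l ++ [s]).idxOf? s = some l.length := by
  induction l with
  | nil => simp [List.idxOf?]
  | cons x xs ih =>
      have hx : ¬ (x == s) = true := by
        simp only [beq_iff_eq]; exact fun he => h (he ▸ List.mem_cons_self)
      simp only [List.cons_append, List.idxOf?_cons, hx]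
      rw [ih (fun hm => h (List.mem_cons_of_mem _ hm))]
      simp

-- Main invariant: running both loops on the same pair stream from related states keeps them related.
theorem idxOf?_of_mem (l : List String) (s : String) (h : s ∈ l) :
    l.idxOf? s = some (l.idxOf s) := by
  induction l with
  | nil => cases h
  | cons x xs ih =>
      by_cases hx : x = s
      · subst hx; simp [List.idxOf?_cons]
      · have hb : ¬ (x == s) = true := by simpa using hx
        simp only [List.idxOf?_cons, List.idxOf_cons, hb, cond_false]
        rw [ih (by rcases List.mem_cons.mp h with h1 | h1; exact absurd h1.symm hx; exact h1)]
        simp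

theorem loop_equiv :
    ∀ (ps : List (String × String)) (d : PySem.Dict String String)
      (pos : PySem.Dict String Int) (onames oseqs : List String),
      onames = d.values → oseqs = d.keys → d.keys.Nodup →
      (∀ k, pos.get? k = (d.keys.idxOf? k).map (fun n => (n : Int))) →
      (ps.foldl (fun (st : PySem.Dict String Int × List String × List String) p =>
          match st.1.get? p.1 with
          | none => (st.1.insert p.1 (st.2.2.length : Int), st.2.1 ++ [p.2], st.2.2 ++ [p.1])
          | some j => (st.1, PySem.List.pySetD st.2.1 j p.2, st.2.2)) (pos, onames, oseqs)).2
        = ((ps.foldl (fun d p => d.insert p.1 p.2) d).values,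
           (ps.foldl (fun d p => d.insert p.1 p.2) d).keys) := by
  intro ps
  induction ps with
  | nil => intro d pos onames oseqs hn hs hnd hpos; simp [hn, hs]
  | cons p ps ih =>
      intro d pos onames oseqs hn hs hnd hpos
      obtain ⟨seq, name⟩ := p
      simp only [List.foldl_cons]
      by_cases hc : seq ∈ d.keys
      · -- repeated sequence: B overwrites the name slot in place; A's dict insert keeps the position
        have hget : pos.get? seq = some ((d.keys.idxOf seq : Int)) := by
          rw [hpos, idxOf?_of_mem _ _ hc]; rfl
        simp only [hget]
        have hcont : d.contains seq = true := (PySem.Dict.contains_iff_mem_keys d seq).mpr hc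
        have hkeys' : (d.insert seq name).keys = d.keys :=
          PySem.Dict.keys_insert_of_contains d name hcont
        have hvals' : (d.insert seq name).values = d.values.set (d.keys.idxOf seq) name := by
          show (d.insert seq name).items.map (·.2) = _
          rw [PySem.Dict.items_insert_of_contains d name hcont]
          exact map_snd_replace d.items seq name hnd hc
        have hset : PySem.List.pySetD onames ((d.keys.idxOf seq : Int)) name
            = onames.set (d.keys.idxOf seq) name := PySem.List.pySetD_natCast _ _ _
        rw [hset]
        exact ih (d.insert seq name) pos (onames.set (d.keys.idxOf seq) name) oseqs
          (by rw [hvals', hn]) (by rw [hkeys', hs])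
          (by rw [hkeys']; exact hnd)
          (by intro k; rw [hpos, hkeys'])
      · -- fresh sequence: both append; B also records its slot index
        have hget : pos.get? seq = none := by
          rw [hpos, List.idxOf?_eq_none_iff.mpr hc]; rfl
        simp only [hget]
        have hcont : d.contains seq = false := by
          rw [← Bool.not_eq_true]
          exact fun h => hc ((PySem.Dict.contains_iff_mem_keys d seq).mp h)
        have hkeys' : (d.insert seq name).keys = d.keys ++ [seq] :=
          PySem.Dict.keys_insert_of_not_contains d name hcont
        have hvals' : (d.insert seq name).values = d.values ++ [name] := by
          show (d.insert seq name).items.map (·.2) = _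
          rw [PySem.Dict.items_insert_of_not_contains d name hcont]
          simp [PySem.Dict.values]
        exact ih (d.insert seq name) (pos.insert seq (oseqs.length : Int))
          (onames ++ [name]) (oseqs ++ [seq])
          (by rw [hvals', hn]) (by rw [hkeys', hs])
          (by rw [hkeys']
              exact List.Nodup.append hnd (List.nodup_singleton seq) (by simpa using hc))
          (by
            intro k
            by_cases hk : k = seq
            · subst hk
              rw [PySem.Dict.get?_insert_self, hkeys', idxOf?_append_self _ _ hc, hs]
              rfl
            · rw [PySem.Dict.get?_insert_of_ne _ _ hk, hpos, hkeys', idxOf?_append_ne _ _ _ hk])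

-- A's range loop and B's range loop, rewritten over the zip.
theorem a_fold_zip (names_list sequence_list : List String)
    (h : sequence_list.length ≤ names_list.length) :
    (PySem.List.pyRange (0 : Int) (sequence_list.length : Int) 1).foldl
        (fun d item => d.insert (PySem.List.pyGetD sequence_list item "")
          (PySem.List.pyGetD names_list item "")) PySem.Dict.empty
      = (sequence_list.zip names_list).foldl (fun d p => d.insert p.1 p.2) PySem.Dict.empty := by
  have := foldl_pyRange_two_aux (fun (d : PySem.Dict String String) s n => d.insert s n)
    sequence_list.length 0 sequence_list names_list PySem.Dict.empty h (by omega)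
  simpa using this

theorem b_fold_zip (names_list sequence_list : List String)
    (h : sequence_list.length ≤ names_list.length) :
    (PySem.List.pyRange (0 : Int) (sequence_list.length : Int) 1).foldl
        (fun (st : PySem.Dict String Int × List String × List String) i =>
          match st.1.get? (PySem.List.pyGetD sequence_list i "") with
          | none => (st.1.insert (PySem.List.pyGetD sequence_list i "") (st.2.2.length : Int),
                     st.2.1 ++ [PySem.List.pyGetD names_list i ""],
                     st.2.2 ++ [PySem.List.pyGetD sequence_list i ""])
          | some j => (st.1, PySem.List.pySetD st.2.1 j (PySem.List.pyGetD names_list i ""), st.2.2))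
        (PySem.Dict.empty, [], [])
      = (sequence_list.zip names_list).foldl
          (fun (st : PySem.Dict String Int × List String × List String) p =>
            match st.1.get? p.1 with
            | none => (st.1.insert p.1 (st.2.2.length : Int), st.2.1 ++ [p.2], st.2.2 ++ [p.1])
            | some j => (st.1, PySem.List.pySetD st.2.1 j p.2, st.2.2))
          (PySem.Dict.empty, [], []) := by
  have := foldl_pyRange_two_aux
    (fun (st : PySem.Dict String Int × List String × List String) s n =>
      match st.1.get? s with
      | none => (st.1.insert s (st.2.2.length : Int), st.2.1 ++ [n], st.2.2 ++ [s])
      | some j => (st.1, PySem.List.pySetD st.2.1 j n, st.2.2))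
    sequence_list.length 0 sequence_list names_list (PySem.Dict.empty, [], []) h (by omega)
  simpa using this

-- ===== VERDICT (by name: the statement is the Claim_ definition above) =====
theorem get_unique_sequences_spec : Claim_equal_get_unique_sequences := by
  intro names_list sequence_list _ hpre
  unfold Spec_get_unique_sequences
  simp only [get_unique_sequences, get_unique_sequences_alt]
  rw [a_fold_zip names_list sequence_list hpre, b_fold_zip names_list sequence_list hpre]
  rw [items_out_loop _ ([], [])]
  have := loop_equiv (sequence_list.zip names_list) PySem.Dict.empty PySem.Dict.empty [] []
    (by rfl) (by rfl) (by simp)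
    (by intro k; simp [PySem.Dict.get?_empty, PySem.Dict.keys_empty, List.idxOf?])
  rw [this]
  simp [PySem.Dict.keys, PySem.Dict.values]
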